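-- pv_equiv track=rewrite | github.com/MLaw2/CMPM-146-Game-AI-P4 | src/autoHTN.py | sort_recipes
-- ===== SOURCE A (Python) =====
-- def sort_recipes(recipes):
-- 	# returns a sorted list of strings with recipe names
-- 	sortedRecipes = []
-- 	# keep track of how many tools found so we can sort them into the right spots
-- 	ironCount = 0
-- 	stoneCount = 0
-- 	woodCount = 0
-- 	for recipeName in recipes:
-- 		# faster recipes are the ones with tools. find the recipes with tools first (each tool has an underscore.)
-- 		# order doesn't matter for crafting recipes (they won't have multiple) exclude those with "craft" first
-- 		# order for procuring resources needs to be: iron, stone, wood, punch (if there is punch)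
-- 		# if underscore then find what type of tool
-- 		if recipeName.find('_') >= 0 and recipeName.find("craft") == -1:
-- 			# now i need to find what kind of tool it is.
-- 			# iron: always goes first
-- 			if recipeName.find("iron") >= 0:
-- 				sortedRecipes.insert(ironCount, recipeName)
-- 				ironCount += 1
-- 			elif recipeName.find("stone") >= 0:
-- 				sortedRecipes.insert(ironCount + stoneCount, recipeName)
-- 				stoneCount+=1
-- 			elif recipeName.find("wooden") >= 0:
-- 				sortedRecipes.insert(ironCount + stoneCount + woodCount, recipeName)
-- 				woodCount+=1
-- 		else:
-- 			# put the element at the end of the list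
-- 			sortedRecipes.append(recipeName)
-- 	return sortedRecipes
-- ===== SOURCE B (Python) =====
-- def sort_recipes(recipes):
-- 	# One pass per category: classify each recipe once, then emit the four
-- 	# category buckets (iron, stone, wooden, everything without a tool
-- 	# underscore / craft recipes) in order. Underscore tool recipes that
-- 	# match none of the three materials are dropped, as in the original.
-- 	def category(name):
-- 		if '_' not in name or 'craft' in name:
-- 			return 3
-- 		if 'iron' in name:
-- 			return 0
-- 		if 'stone' in name:
-- 			return 1
-- 		if 'wooden' in name:
-- 			return 2
-- 		return -1  # unmatched tool recipe: emitted by no bucket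
-- 	return [r for k in (0, 1, 2, 3) for r in recipes if category(r) == k]
-- ===== Notes on version B (the rewrite author's own statement) =====
-- stated objective: alternative
-- what changed: Replaces the counter-tracked list.insert loop with a classify-then-bucket-concatenation scheme (one filter pass per category), removing the mid-list inserts.
import Mathlib
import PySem

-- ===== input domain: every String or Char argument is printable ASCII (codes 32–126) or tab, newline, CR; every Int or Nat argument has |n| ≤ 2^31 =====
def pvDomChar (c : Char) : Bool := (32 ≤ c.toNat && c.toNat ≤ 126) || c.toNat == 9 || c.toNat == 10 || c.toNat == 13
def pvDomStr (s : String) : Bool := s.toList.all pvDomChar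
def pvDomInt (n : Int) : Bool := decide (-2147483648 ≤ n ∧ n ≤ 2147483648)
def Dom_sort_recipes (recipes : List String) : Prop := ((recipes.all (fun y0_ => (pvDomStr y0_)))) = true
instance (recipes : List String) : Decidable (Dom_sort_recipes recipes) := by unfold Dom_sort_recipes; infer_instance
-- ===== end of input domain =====

-- B replaces A's counter-tracked mid-list inserts by a classify-then-bucket
-- concatenation of the four categories; return value proved equal on all inputs.

-- ===== PORT A =====
-- A's loop: state is the growing list plus the three tool counters.
def sortRecipesLoopA : List String → List String → Nat → Nat → Nat → List String
  | [], acc, _, _, _ => acc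
  | r :: rs, acc, ic, sc, wc =>
    if PySem.Str.find r "_" ≥ 0 ∧ PySem.Str.find r "craft" = -1 then
      if PySem.Str.find r "iron" ≥ 0 then
        sortRecipesLoopA rs (PySem.List.insert acc (ic : Int) r) (ic + 1) sc wc
      else if PySem.Str.find r "stone" ≥ 0 then
        sortRecipesLoopA rs (PySem.List.insert acc ((ic + sc : Nat) : Int) r) ic (sc + 1) wc
      else if PySem.Str.find r "wooden" ≥ 0 then
        sortRecipesLoopA rs (PySem.List.insert acc ((ic + sc + wc : Nat) : Int) r) ic sc (wc + 1)
      else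
        sortRecipesLoopA rs acc ic sc wc
    else
      sortRecipesLoopA rs (acc ++ [r]) ic sc wc

def sort_recipes (recipes : List String) : List String :=
  sortRecipesLoopA recipes [] 0 0 0

-- ===== PORT B =====
-- B's helper: the category of a recipe name (3 = no tool underscore / craft,
-- 0/1/2 = iron/stone/wooden, -1 = unmatched tool recipe, dropped).
def recipeCategory (name : String) : Int :=
  if ¬ PySem.Str.isIn "_" name ∨ PySem.Str.isIn "craft" name then 3
  else if PySem.Str.isIn "iron" name then 0
  else if PySem.Str.isIn "stone" name then 1
  else if PySem.Str.isIn "wooden" name then 2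
  else -1

def sort_recipes_alt (recipes : List String) : List String :=
  ([0, 1, 2, 3] : List Int).flatMap (fun k => recipes.filter (fun r => recipeCategory r == k))

-- ===== PRECONDITION & SPEC =====
def Spec_sort_recipes (recipes : List String) (out : List String) : Prop := out = sort_recipes_alt recipes
instance (recipes : List String) (out : List String) : Decidable (Spec_sort_recipes recipes out) := by unfold Spec_sort_recipes; infer_instance

-- ===== CLAIM (what is proved, stated in full; the proofs are below) =====
def Claim_equal_sort_recipes : Prop := ∀ (recipes : List String), Dom_sort_recipes recipes → Spec_sort_recipes recipes (sort_recipes recipes)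

-- ===== LEMMAS AND PROOFS =====

-- A's branch test 'find ≥ 0' is B's membership test.
theorem find_nonneg_eq_isIn (s sub : String) :
    (PySem.Str.find s sub ≥ 0) ↔ PySem.Str.isIn sub s = true := by
  constructor
  · intro h
    exact (PySem.Str.isIn_iff_infix sub s).mpr ((PySem.Str.find_nonneg_iff s sub).mp h)
  · intro h
    exact (PySem.Str.find_nonneg_iff s sub).mpr ((PySem.Str.isIn_iff_infix sub s).mp h)

theorem not_find_nonneg_isIn_false (s sub : String) (h : ¬ PySem.Str.find s sub ≥ 0) :
    PySem.Str.isIn sub s = false :=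
  Bool.eq_false_iff.mpr (fun hh => h ((find_nonneg_eq_isIn s sub).mpr hh))

theorem find_eq_neg_one_eq_not_isIn (s sub : String) :
    (PySem.Str.find s sub = -1) ↔ PySem.Str.isIn sub s = false := by
  rw [PySem.Str.find_eq_neg_one_iff, ← PySem.Str.isIn_iff_infix]
  simp

-- inserting at the length of a prefix splices the element between prefix and suffix
theorem insert_at_prefix_len (I T : List String) (r : String) :
    PySem.List.insert (I ++ T) ((I.length : Nat) : Int) r = I ++ r :: T := by
  rw [PySem.List.insert_natCast (I ++ T) I.length r (by simp)]
  simp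

-- Loop invariant: running A's loop on rs with accumulator I ++ S ++ W ++ O and
-- counters |I| |S| |W| appends each category's filter of rs to its bucket.
theorem loopA_inv (rs : List String) : ∀ (I S W O : List String),
    sortRecipesLoopA rs (I ++ S ++ W ++ O) I.length S.length W.length
      = (I ++ rs.filter (fun r => recipeCategory r == 0))
        ++ (S ++ rs.filter (fun r => recipeCategory r == 1))
        ++ (W ++ rs.filter (fun r => recipeCategory r == 2))
        ++ (O ++ rs.filter (fun r => recipeCategory r == 3)) := by
  induction rs with
  | nil => intro I S W O; simp [sortRecipesLoopA]
  | cons r rs ih =>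
    intro I S W O
    by_cases hout : PySem.Str.find r "_" ≥ 0 ∧ PySem.Str.find r "craft" = -1
    · have h_ : PySem.Str.isIn "_" r = true := (find_nonneg_eq_isIn r "_").mp hout.1
      have hc : PySem.Str.isIn "craft" r = false := (find_eq_neg_one_eq_not_isIn r "craft").mp hout.2
      simp at h_ hc
      by_cases hi : PySem.Str.find r "iron" ≥ 0
      · -- iron branch
        have hi' : PySem.Str.isIn "iron" r = true := (find_nonneg_eq_isIn r "iron").mp hi
        simp at hi'
        have hcat : recipeCategory r = 0 := by simp [recipeCategory, h_, hc, hi']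
        have hstep : sortRecipesLoopA (r :: rs) (I ++ S ++ W ++ O) I.length S.length W.length
            = sortRecipesLoopA rs (PySem.List.insert (I ++ S ++ W ++ O) ((I.length : Nat) : Int) r)
                (I.length + 1) S.length W.length := by
          simp only [sortRecipesLoopA]
          rw [if_pos hout, if_pos hi]
        have hacc : PySem.List.insert (I ++ S ++ W ++ O) ((I.length : Nat) : Int) r
            = (I ++ [r]) ++ S ++ W ++ O := by
          rw [show I ++ S ++ W ++ O = I ++ (S ++ W ++ O) by simp,
            insert_at_prefix_len I (S ++ W ++ O) r]
          simp
        rw [hstep, hacc]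
        have h := ih (I ++ [r]) S W O
        simp only [List.length_append, List.length_singleton] at h
        rw [h]
        simp [hcat, List.append_assoc]
      · have hi' : PySem.Str.isIn "iron" r = false := not_find_nonneg_isIn_false r "iron" hi
        simp at hi'
        by_cases hs : PySem.Str.find r "stone" ≥ 0
        · -- stone branch
          have hs' : PySem.Str.isIn "stone" r = true := (find_nonneg_eq_isIn r "stone").mp hs
          simp at hs'
          have hcat : recipeCategory r = 1 := by simp [recipeCategory, h_, hc, hi', hs']
          have hstep : sortRecipesLoopA (r :: rs) (I ++ S ++ W ++ O) I.length S.length W.length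
              = sortRecipesLoopA rs (PySem.List.insert (I ++ S ++ W ++ O) ((I.length + S.length : Nat) : Int) r)
                  I.length (S.length + 1) W.length := by
            simp only [sortRecipesLoopA]
            rw [if_pos hout, if_neg hi, if_pos hs]
          have hacc : PySem.List.insert (I ++ S ++ W ++ O) ((I.length + S.length : Nat) : Int) r
              = I ++ (S ++ [r]) ++ W ++ O := by
            rw [show ((I.length + S.length : Nat) : Int) = (((I ++ S).length : Nat) : Int) by simp,
              show I ++ S ++ W ++ O = (I ++ S) ++ (W ++ O) by simp,
              insert_at_prefix_len (I ++ S) (W ++ O) r]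
            simp
          rw [hstep, hacc]
          have h := ih I (S ++ [r]) W O
          simp only [List.length_append, List.length_singleton] at h
          rw [h]
          simp [hcat, List.append_assoc]
        · have hs' : PySem.Str.isIn "stone" r = false := not_find_nonneg_isIn_false r "stone" hs
          simp at hs'
          by_cases hw : PySem.Str.find r "wooden" ≥ 0
          · -- wooden branch
            have hw' : PySem.Str.isIn "wooden" r = true := (find_nonneg_eq_isIn r "wooden").mp hw
            simp at hw'
            have hcat : recipeCategory r = 2 := by simp [recipeCategory, h_, hc, hi', hs', hw']
            have hstep : sortRecipesLoopA (r :: rs) (I ++ S ++ W ++ O) I.length S.length W.length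
                = sortRecipesLoopA rs (PySem.List.insert (I ++ S ++ W ++ O)
                    ((I.length + S.length + W.length : Nat) : Int) r) I.length S.length (W.length + 1) := by
              simp only [sortRecipesLoopA]
              rw [if_pos hout, if_neg hi, if_neg hs, if_pos hw]
            have hacc : PySem.List.insert (I ++ S ++ W ++ O) ((I.length + S.length + W.length : Nat) : Int) r
                = I ++ S ++ (W ++ [r]) ++ O := by
              rw [show ((I.length + S.length + W.length : Nat) : Int) = (((I ++ S ++ W).length : Nat) : Int) by push_cast [List.length_append]; ring,
                insert_at_prefix_len (I ++ S ++ W) O r]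
              simp
            rw [hstep, hacc]
            have h := ih I S (W ++ [r]) O
            simp only [List.length_append, List.length_singleton] at h
            rw [h]
            simp [hcat, List.append_assoc]
          · -- unmatched tool recipe: dropped
            have hw' : PySem.Str.isIn "wooden" r = false := not_find_nonneg_isIn_false r "wooden" hw
            simp at hw'
            have hcat : recipeCategory r = -1 := by simp [recipeCategory, h_, hc, hi', hs', hw']
            have hstep : sortRecipesLoopA (r :: rs) (I ++ S ++ W ++ O) I.length S.length W.length
                = sortRecipesLoopA rs (I ++ S ++ W ++ O) I.length S.length W.length := by
              simp only [sortRecipesLoopA]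
              rw [if_pos hout, if_neg hi, if_neg hs, if_neg hw]
            rw [hstep, ih I S W O]
            simp [hcat]
    · -- no tool underscore / craft recipe: appended at the end
      have hcat : recipeCategory r = 3 := by
        rcases not_and_or.mp hout with h | h
        · have h' : PySem.Str.isIn "_" r = false := not_find_nonneg_isIn_false r "_" h
          simp at h'
          simp [recipeCategory, h']
        · have h' : PySem.Str.isIn "craft" r = true := by
            rcases hh : PySem.Str.isIn "craft" r with _ | _
            · exact absurd ((find_eq_neg_one_eq_not_isIn r "craft").mpr hh) h
            · rfl
          simp at h'
          simp [recipeCategory, h']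
      have hstep : sortRecipesLoopA (r :: rs) (I ++ S ++ W ++ O) I.length S.length W.length
          = sortRecipesLoopA rs ((I ++ S ++ W ++ O) ++ [r]) I.length S.length W.length := by
        simp only [sortRecipesLoopA]
        rw [if_neg hout]
      rw [hstep, show (I ++ S ++ W ++ O) ++ [r] = I ++ S ++ W ++ (O ++ [r]) by simp,
        ih I S W (O ++ [r])]
      simp [hcat, List.append_assoc]

-- ===== VERDICT (by name: the statement is the Claim_ definition above) =====
theorem sort_recipes_spec : Claim_equal_sort_recipes := by
  intro recipes _
  show sort_recipes recipes = sort_recipes_alt recipes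
  have := loopA_inv recipes [] [] [] []
  simpa [sort_recipes, sort_recipes_alt, List.flatMap] using this
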